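-- pv_equiv track=rewrite | github.com/Jaxame/Algo_python_project | SequencesToSPSS.py | kmer_generation
-- ===== SOURCE A (Python) =====
-- def rev_comp(seq: str) -> str:
--     """
--     Returns the reverse complement of a DNA sequence.
--
--     Args:
--         seq (str): a DNA sequence
--
--     Returns:
--         str: the reverse complement of the DNA sequence
--     """
--     rev = str.maketrans("ACGT", "TGCA")
--     return seq.translate(rev)[::-1]
--
-- def canonical(kmer: str) -> str:
--     """
--     Returns the canonical form of a k-mer.
--
--     Args:
--         kmer (str): k-mer
--
--     Returns:
--         str: canonical k-mer
--     """
--     return min(kmer, rev_comp(kmer))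
--
-- def kmer_generation(seq: str, kmer_freq_dict: dict, k_size: int) -> dict:
--     """
--     Fills a dictionary with the canonical k-mers present in a DNA sequence,
--     associated with their frequencies.
--
--     Args:
--         seq (str): source DNA sequence
--         kmer_freq_dict (dict): target dictionary
--         k_size (int): size of the k-mers
--
--     Returns:
--         kmer_freq_dict (dict): canonical k-mers and their frequencies
--     """
--     for i in range(0, len(seq) - k_size + 1):
--         # selecting the canonical k-mers
--         kmer = canonical(seq[i:i + k_size])
--
--         # while counting them, adding them to the dictionary
--         if kmer in kmer_freq_dict:
--             kmer_freq_dict[kmer] += 1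
--         else:
--             kmer_freq_dict[kmer] = 1
--
--     return kmer_freq_dict
-- ===== SOURCE B (Python) =====
-- def kmer_generation(seq, kmer_freq_dict, k_size):
--     # Rolling numeric encoding: the current window and its reverse complement are
--     # kept as base-128 integers updated in O(1) per shift; on equal-length
--     # strings of code points < 128, lexicographic order equals numeric order of
--     # these codes, so the canonical choice is a single integer comparison.
--     COMP = {'A': 'T', 'C': 'G', 'G': 'C', 'T': 'A'}
--     n = len(seq)
--     B = 128
--     fwd = 0          # base-128 code of the current window
--     rc = 0           # base-128 code of its reverse complement
--     pw = 1
--     for c in seq[:k_size]: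
--         fwd = fwd * B + ord(c)
--         rc += ord(COMP.get(c, c)) * pw
--         pw *= B
--     top = pw // B    # B ** (k_size - 1) when k_size >= 1
--     for i in range(n - k_size + 1):
--         if fwd <= rc:
--             key = seq[i:i + k_size]
--         else:
--             key = ''.join(COMP.get(c, c) for c in reversed(seq[i:i + k_size]))
--         kmer_freq_dict[key] = kmer_freq_dict.get(key, 0) + 1
--         if i + k_size < n:
--             c0, c1 = seq[i], seq[i + k_size]
--             fwd = (fwd - ord(c0) * top) * B + ord(c1)
--             rc = (rc - ord(COMP.get(c0, c0))) // B + ord(COMP.get(c1, c1)) * top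
--     return kmer_freq_dict
-- ===== Notes on version B (the rewrite author's own statement) =====
-- stated objective: alternative
-- what changed: B replaces A's per-window translate+reverse+string-min by a rolling numeric scheme: the current window and its reverse complement are maintained as base-128 integer codes updated in O(1) per shift, and the canonical side is chosen by a single integer comparison instead of a string comparison of two freshly built strings.
-- outside the precondition, e.g. on kmer_generation(' GGT', {}, -3): A returns {' ': 1, 'C': 2, '': 5}, B raises IndexError
import Mathlib
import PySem

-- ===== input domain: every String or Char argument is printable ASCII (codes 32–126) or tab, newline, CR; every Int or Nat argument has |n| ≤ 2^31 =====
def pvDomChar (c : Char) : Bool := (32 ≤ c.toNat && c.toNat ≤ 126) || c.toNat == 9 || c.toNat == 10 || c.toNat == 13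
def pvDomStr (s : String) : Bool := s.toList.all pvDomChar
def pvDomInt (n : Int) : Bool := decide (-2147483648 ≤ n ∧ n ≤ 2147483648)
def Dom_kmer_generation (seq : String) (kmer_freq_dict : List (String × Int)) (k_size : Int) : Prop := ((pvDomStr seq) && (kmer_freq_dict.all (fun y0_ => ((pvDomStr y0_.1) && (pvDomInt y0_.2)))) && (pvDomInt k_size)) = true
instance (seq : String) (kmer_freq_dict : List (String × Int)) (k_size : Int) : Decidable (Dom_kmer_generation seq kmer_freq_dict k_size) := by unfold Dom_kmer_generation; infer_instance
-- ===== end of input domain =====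

-- B replaces A's per-window translate+reverse+string-min by rolling base-128 integer
-- codes of the window and its reverse complement (O(1) updates per shift, one integer
-- comparison picks the canonical side); return-value equivalence (in Python both mutate
-- kmer_freq_dict in place).

-- ===== PORT A =====
-- translate via str.maketrans("ACGT","TGCA"): characters outside the table are unchanged (exact, hand-ported)
def pvComp (c : Char) : Char :=
  if c = 'A' then 'T' else if c = 'C' then 'G' else if c = 'G' then 'C' else if c = 'T' then 'A' else c

def rev_comp (seq : String) : String :=
  String.ofList ((seq.toList.map pvComp).reverse)

-- min(kmer, rev_comp(kmer)): Python's min(a, b) is b if b < a else a, code-point lexicographic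
def canonical (kmer : String) : String :=
  let r := rev_comp kmer
  if PySem.Chars.strLt r.toList kmer.toList then r else kmer

def kmer_generation (seq : String) (kmer_freq_dict : List (String × Int)) (k_size : Int) : List (String × Int) :=
  (List.foldl
    (fun acc i =>
      let kmer := canonical (String.ofList (PySem.List.slice seq.toList (some i) (some (i + k_size))))
      if acc.contains kmer then acc.insert kmer (acc.getD kmer 0 + 1) else acc.insert kmer 1)
    (PySem.Dict.ofList kmer_freq_dict)
    (PySem.List.pyRange 0 (PySem.Str.len seq - k_size + 1) 1)).items

-- ===== PORT B =====
-- COMP.get(c, c)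
def pvCompB (c : Char) : Char :=
  if c = 'A' then 'T' else if c = 'C' then 'G' else if c = 'G' then 'C' else if c = 'T' then 'A' else c

def kmer_generation_alt (seq : String) (kmer_freq_dict : List (String × Int)) (k_size : Int) : List (String × Int) :=
  let s := seq.toList
  let n : Int := PySem.Str.len seq
  let init :=
    List.foldl
      (fun (st : Int × Int × Int) c =>
        (st.1 * 128 + (c.toNat : Int), st.2.1 + ((pvCompB c).toNat : Int) * st.2.2, st.2.2 * 128))
      (0, 0, 1) (PySem.List.slice s none (some k_size))
  let top := PySem.Int.floordiv init.2.2 128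
  (List.foldl
    (fun (st : Int × Int × PySem.Dict String Int) i =>
      let key := if st.1 ≤ st.2.1
        then String.ofList (PySem.List.slice s (some i) (some (i + k_size)))
        else String.ofList (List.map pvCompB (PySem.List.slice s (some i) (some (i + k_size))).reverse)
      let acc := st.2.2.insert key (st.2.2.getD key 0 + 1)
      if i + k_size < n then
        -- seq[i] and seq[i + k_size]: always in range here when 0 ≤ k_size (Pre_)
        let c0 := PySem.List.pyGetD s i ' '
        let c1 := PySem.List.pyGetD s (i + k_size) ' '
        ((st.1 - ((c0.toNat : Int)) * top) * 128 + (c1.toNat : Int),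
         PySem.Int.floordiv (st.2.1 - ((pvCompB c0).toNat : Int)) 128 + ((pvCompB c1).toNat : Int) * top,
         acc)
      else (st.1, st.2.1, acc))
    (init.1, init.2.1, PySem.Dict.ofList kmer_freq_dict)
    (PySem.List.pyRange 0 (n - k_size + 1) 1)).2.2.items

-- ===== PRECONDITION & SPEC =====
-- Pre_ excludes negative k_size, outside the natural k-mer-size domain: there A's window
-- slice seq[i:i+k_size] wraps around per Python slice semantics and still returns, while
-- B's rolling scheme indexes seq[i] / seq[i + k_size] and raises IndexError.
def Pre_kmer_generation (seq : String) (kmer_freq_dict : List (String × Int)) (k_size : Int) : Prop :=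
  0 ≤ k_size
instance (seq : String) (kmer_freq_dict : List (String × Int)) (k_size : Int) : Decidable (Pre_kmer_generation seq kmer_freq_dict k_size) := by unfold Pre_kmer_generation; infer_instance

def pvWitness_kmer_generation : String × (List (String × Int)) × Int := ("ACGTAC", [("AC", 3)], 2)

def Spec_kmer_generation (seq : String) (kmer_freq_dict : List (String × Int)) (k_size : Int) (out : List (String × Int)) : Prop := out = kmer_generation_alt seq kmer_freq_dict k_size
instance (seq : String) (kmer_freq_dict : List (String × Int)) (k_size : Int) (out : List (String × Int)) : Decidable (Spec_kmer_generation seq kmer_freq_dict k_size out) := by unfold Spec_kmer_generation; infer_instance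

-- ===== CLAIM (what is proved, stated in full; the proofs are below) =====
def Claim_equal_kmer_generation : Prop := ∀ (seq : String) (kmer_freq_dict : List (String × Int)) (k_size : Int), Dom_kmer_generation seq kmer_freq_dict k_size → Pre_kmer_generation seq kmer_freq_dict k_size → Spec_kmer_generation seq kmer_freq_dict k_size (kmer_generation seq kmer_freq_dict k_size)


-- ===== LEMMAS AND PROOFS =====

-- the two complement tables are the same function
lemma compB_eq_comp : pvCompB = pvComp := rfl

-- base-128 code of a character list (what B's fwd accumulates)
def pvEnc (l : List Char) : Int :=
  l.foldl (fun a c => a * 128 + (c.toNat : Int)) 0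

-- base-128 code of the reverse complement (what B's rc accumulates)
def pvEncR (l : List Char) : Int :=
  pvEnc ((l.map pvComp).reverse)

-- all code points < 128 (holds for every character of a Dom string)
def pvSmall (l : List Char) : Prop := ∀ c ∈ l, c.toNat < 128

lemma pvComp_small {c : Char} (h : c.toNat < 128) : (pvComp c).toNat < 128 := by
  unfold pvComp; split_ifs <;> simp_all

lemma pvEnc_shift (l : List Char) (a : Int) :
    l.foldl (fun a c => a * 128 + (c.toNat : Int)) a = a * 128 ^ l.length + pvEnc l := by
  induction l generalizing a with
  | nil => simp [pvEnc]
  | cons c l ih =>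
    simp only [List.foldl_cons, List.length_cons, pvEnc] at *
    rw [ih (a * 128 + (c.toNat : Int)), ih (0 * 128 + (c.toNat : Int))]
    ring

lemma pvEnc_cons (c : Char) (l : List Char) :
    pvEnc (c :: l) = (c.toNat : Int) * 128 ^ l.length + pvEnc l := by
  have h := pvEnc_shift l (0 * 128 + (c.toNat : Int))
  simp only [pvEnc, List.foldl_cons]
  rw [h]
  have h2 : (0 : Int) * 128 + (c.toNat : Int) = (c.toNat : Int) := by ring
  rw [h2]
  rfl

lemma pvEnc_snoc (l : List Char) (c : Char) :
    pvEnc (l ++ [c]) = pvEnc l * 128 + (c.toNat : Int) := by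
  simp [pvEnc, List.foldl_append]

lemma pvEnc_bounds (l : List Char) (h : pvSmall l) :
    0 ≤ pvEnc l ∧ pvEnc l < 128 ^ l.length := by
  induction l with
  | nil => simp [pvEnc]
  | cons c l ih =>
    obtain ⟨h0, h1⟩ := ih (fun x hx => h x (List.mem_cons_of_mem _ hx))
    have hc : (c.toNat : Int) < 128 := by exact_mod_cast h c (List.mem_cons_self ..)
    have hc0 : (0 : Int) ≤ (c.toNat : Int) := Int.natCast_nonneg _
    have hp : (0 : Int) < 128 ^ l.length := by positivity
    rw [pvEnc_cons]
    constructor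
    · nlinarith
    · have : (c.toNat : Int) * 128 ^ l.length + pvEnc l < ((c.toNat : Int) + 1) * 128 ^ l.length := by nlinarith
      have h2 : ((c.toNat : Int) + 1) * 128 ^ l.length ≤ 128 * 128 ^ l.length := by nlinarith
      calc (c.toNat : Int) * 128 ^ l.length + pvEnc l < ((c.toNat : Int) + 1) * 128 ^ l.length := this
        _ ≤ 128 * 128 ^ l.length := h2
        _ = 128 ^ (l.length + 1) := by ring
        _ = 128 ^ (c :: l).length := by simp

lemma pvEncR_cons (c : Char) (l : List Char) :
    pvEncR (c :: l) = ((pvComp c).toNat : Int) + 128 * pvEncR l := by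
  simp only [pvEncR, List.map_cons, List.reverse_cons]
  rw [pvEnc_snoc]; ring

lemma pvEncR_snoc (l : List Char) (c : Char) :
    pvEncR (l ++ [c]) = pvEncR l + ((pvComp c).toNat : Int) * 128 ^ l.length := by
  simp only [pvEncR, List.map_append, List.map_cons, List.map_nil, List.reverse_append,
    List.reverse_cons, List.reverse_nil, List.nil_append, List.singleton_append]
  rw [pvEnc_cons]
  simp [Nat.add_comm]
  ring

lemma char_lt_iff (c d : Char) : c < d ↔ c.toNat < d.toNat :=
  ⟨fun h => h, fun h => h⟩

lemma char_eq_of_toNat (c d : Char) (h : c.toNat = d.toNat) : c = d := by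
  exact Char.ext (UInt32.toNat_inj.mp h)

-- numeric order of codes = lexicographic order, for equal-length small lists
lemma pvEnc_lt_iff (l m : List Char) (hlen : l.length = m.length)
    (hl : pvSmall l) (hm : pvSmall m) : pvEnc l < pvEnc m ↔ l < m := by
  induction l generalizing m with
  | nil =>
    cases m with
    | nil => simp [pvEnc, lt_irrefl]
    | cons d m => simp at hlen
  | cons c l ih =>
    cases m with
    | nil => simp at hlen
    | cons d m =>
      have hlen' : l.length = m.length := by simpa using hlen
      have hl' : pvSmall l := fun x hx => hl x (List.mem_cons_of_mem _ hx)
      have hm' : pvSmall m := fun x hx => hm x (List.mem_cons_of_mem _ hx)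
      have hc : (c.toNat : Int) < 128 := by exact_mod_cast hl c (List.mem_cons_self ..)
      have hd : (d.toNat : Int) < 128 := by exact_mod_cast hm d (List.mem_cons_self ..)
      obtain ⟨hl0, hl1⟩ := pvEnc_bounds l hl'
      obtain ⟨hm0, hm1⟩ := pvEnc_bounds m hm'
      rw [List.cons_lt_cons_iff, pvEnc_cons, pvEnc_cons, hlen', ← ih m hlen' hl' hm']
      rw [char_lt_iff]
      set P : Int := 128 ^ m.length with hP
      have hm1' : pvEnc m < P := by rw [hP]; exact hm1
      have hl1' : pvEnc l < P := by rw [hP, ← hlen']; exact hl1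
      have hPpos : (0 : Int) < P := by rw [hP]; positivity
      constructor
      · intro hlt
        rcases lt_trichotomy c.toNat d.toNat with h | h | h
        · exact Or.inl h
        · refine Or.inr ⟨char_eq_of_toNat c d h, ?_⟩
          have : (c.toNat : Int) = (d.toNat : Int) := by exact_mod_cast h
          nlinarith
        · exfalso
          have : (d.toNat : Int) < (c.toNat : Int) := by exact_mod_cast h
          nlinarith
      · rintro (h | ⟨rfl, h⟩)
        · have : (c.toNat : Int) < (d.toNat : Int) := by exact_mod_cast h
          nlinarith
        · nlinarith

-- A's membership-branch dictionary update is the get-with-default update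
lemma dict_step (acc : PySem.Dict String Int) (key : String) :
    (if acc.contains key then acc.insert key (acc.getD key 0 + 1) else acc.insert key 1)
      = acc.insert key (acc.getD key 0 + 1) := by
  by_cases h : acc.contains key
  · simp [h]
  · simp only [Bool.not_eq_true] at h
    have h0 : acc.getD key 0 = 0 := PySem.Dict.getD_of_not_contains _ _ h
    simp [h, h0]


-- named copies of the two ports' loop bodies (definitionally equal to the inline lambdas)
def pvAstep (s : List Char) (k : Int) (acc : PySem.Dict String Int) (i : Int) : PySem.Dict String Int :=
  let kmer := canonical (String.ofList (PySem.List.slice s (some i) (some (i + k))))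
  if acc.contains kmer then acc.insert kmer (acc.getD kmer 0 + 1) else acc.insert kmer 1

def pvBstep (s : List Char) (n k top : Int) (st : Int × Int × PySem.Dict String Int) (i : Int) :
    Int × Int × PySem.Dict String Int :=
  let key := if st.1 ≤ st.2.1
    then String.ofList (PySem.List.slice s (some i) (some (i + k)))
    else String.ofList (List.map pvCompB (PySem.List.slice s (some i) (some (i + k))).reverse)
  let acc := st.2.2.insert key (st.2.2.getD key 0 + 1)
  if i + k < n then
    let c0 := PySem.List.pyGetD s i ' '
    let c1 := PySem.List.pyGetD s (i + k) ' '
    ((st.1 - ((c0.toNat : Int)) * top) * 128 + (c1.toNat : Int),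
     PySem.Int.floordiv (st.2.1 - ((pvCompB c0).toNat : Int)) 128 + ((pvCompB c1).toNat : Int) * top,
     acc)
  else (st.1, st.2.1, acc)

def pvInit (s : List Char) (k : Int) : Int × Int × Int :=
  List.foldl
    (fun (st : Int × Int × Int) c =>
      (st.1 * 128 + (c.toNat : Int), st.2.1 + ((pvCompB c).toNat : Int) * st.2.2, st.2.2 * 128))
    (0, 0, 1) (PySem.List.slice s none (some k))

lemma init_fold (l : List Char) : ∀ f r p : Int,
    List.foldl
      (fun (st : Int × Int × Int) c =>
        (st.1 * 128 + (c.toNat : Int), st.2.1 + ((pvCompB c).toNat : Int) * st.2.2, st.2.2 * 128))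
      (f, r, p) l
    = (l.foldl (fun a c => a * 128 + (c.toNat : Int)) f, r + pvEncR l * p, p * 128 ^ l.length) := by
  induction l with
  | nil => intro f r p; simp [pvEncR, pvEnc]
  | cons c l ih =>
    intro f r p
    simp only [List.foldl_cons]
    rw [ih, pvEncR_cons, compB_eq_comp, List.length_cons]
    simp only [Prod.mk.injEq]
    refine ⟨by trivial, by ring, by ring⟩

lemma slice_self {α : Type} (xs : List α) (i : Int) : PySem.List.slice xs (some i) (some i) = [] := by
  have h := PySem.List.length_slice xs i i
  rw [Nat.sub_self] at h
  exact List.eq_nil_of_length_eq_zero h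

lemma canonical_nil : canonical (String.ofList []) = String.ofList [] := by decide

lemma win_len (s : List Char) (a kb : Nat) (h : a + kb ≤ s.length) :
    ((s.drop a).take kb).length = kb := by
  simp [List.length_take, List.length_drop]
  omega

lemma win_small {s : List Char} (hs : pvSmall s) (a kb : Nat) :
    pvSmall ((s.drop a).take kb) :=
  fun c hc => hs c (List.mem_of_mem_drop (List.mem_of_mem_take hc))

lemma rc_small {w : List Char} (hw : pvSmall w) : pvSmall ((w.map pvComp).reverse) := by
  intro c hc
  rw [List.mem_reverse, List.mem_map] at hc
  obtain ⟨x, hx, rfl⟩ := hc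
  exact pvComp_small (hw x hx)

lemma getD_at (s : List Char) (a : Nat) (h : a < s.length) :
    PySem.List.pyGetD s (a : Int) ' ' = s[a] := by
  rw [PySem.List.pyGetD_natCast]
  exact List.getD_eq_getElem s ' ' h

-- B's branchless canonical choice equals A's canonical of the window
lemma step_key (s : List Char) (hs : pvSmall s) (kb a : Nat) (h : a + kb ≤ s.length) :
    (if pvEnc ((s.drop a).take kb) ≤ pvEncR ((s.drop a).take kb)
      then String.ofList (PySem.List.slice s (some (a : Int)) (some ((a : Int) + (kb : Int))))
      else String.ofList (List.map pvCompB (PySem.List.slice s (some (a : Int)) (some ((a : Int) + (kb : Int)))).reverse))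
    = canonical (String.ofList (PySem.List.slice s (some (a : Int)) (some ((a : Int) + (kb : Int))))) := by
  rw [PySem.List.slice_natCast_add]
  set w := (s.drop a).take kb with hw
  have hwl : w.length = kb := win_len s a kb h
  have hws : pvSmall w := win_small hs a kb
  have hrs : pvSmall ((w.map pvComp).reverse) := rc_small hws
  have hrl : ((w.map pvComp).reverse).length = w.length := by simp
  have hlex : pvEncR w < pvEnc w ↔ (w.map pvComp).reverse < w :=
    pvEnc_lt_iff ((w.map pvComp).reverse) w hrl hrs hws
  unfold canonical rev_comp
  simp only [String.toList_ofList]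
  by_cases hle : pvEnc w ≤ pvEncR w
  · rw [if_pos hle]
    have : PySem.Chars.strLt ((w.map pvComp).reverse) w = false := by
      have : ¬ ((w.map pvComp).reverse < w) := by
        rw [← hlex]; omega
      simpa [PySem.Chars.strLt] using this
    rw [this]
    simp
  · rw [if_neg hle]
    have hlt : (w.map pvComp).reverse < w := by rw [← hlex]; omega
    have : PySem.Chars.strLt ((w.map pvComp).reverse) w = true := by
      simpa [PySem.Chars.strLt] using hlt
    rw [this]
    rw [compB_eq_comp, List.map_reverse]
    simp

lemma win_decomp_head (s : List Char) (kb a : Nat) (hkb : 1 ≤ kb) (h : a + kb < s.length) :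
    (s.drop a).take kb = s[a]'(by omega) :: ((s.drop (a + 1)).take (kb - 1)) := by
  obtain ⟨kb', rfl⟩ : ∃ kb', kb = kb' + 1 := ⟨kb - 1, by omega⟩
  rw [List.drop_eq_getElem_cons (show a < s.length by omega), List.take_succ_cons]
  simp

lemma win_decomp_last (s : List Char) (kb a : Nat) (hkb : 1 ≤ kb) (h : a + kb < s.length) :
    (s.drop (a + 1)).take kb = ((s.drop (a + 1)).take (kb - 1)) ++ [s[a + kb]'h] := by
  obtain ⟨kb', rfl⟩ : ∃ kb', kb = kb' + 1 := ⟨kb - 1, by omega⟩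
  rw [List.take_add_one]
  have h1 : (kb' + 1) - 1 = kb' := by omega
  rw [h1]
  have h2 : (List.drop (a + 1) s)[kb']? = some (s[a + (kb' + 1)]'h) := by
    rw [List.getElem?_drop]
    have he : a + 1 + kb' = a + (kb' + 1) := by omega
    rw [he, List.getElem?_eq_getElem h]
  rw [h2]
  rfl

lemma roll_fwd (s : List Char) (kb a : Nat) (hkb : 1 ≤ kb) (h : a + kb < s.length) :
    (pvEnc ((s.drop a).take kb) - ((PySem.List.pyGetD s (a : Int) ' ').toNat : Int) * 128 ^ (kb - 1)) * 128
      + ((PySem.List.pyGetD s ((a : Int) + (kb : Int)) ' ').toNat : Int)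
    = pvEnc ((s.drop (a + 1)).take kb) := by
  have hcast : (a : Int) + (kb : Int) = ((a + kb : Nat) : Int) := by push_cast; ring
  rw [getD_at s a (by omega), hcast, getD_at s (a + kb) h]
  rw [win_decomp_head s kb a hkb h, win_decomp_last s kb a hkb h]
  rw [pvEnc_cons, pvEnc_snoc]
  have hmid : ((s.drop (a + 1)).take (kb - 1)).length = kb - 1 := win_len s (a + 1) (kb - 1) (by omega)
  rw [hmid]
  ring

lemma roll_rc (s : List Char) (kb a : Nat) (hkb : 1 ≤ kb) (h : a + kb < s.length) :
    PySem.Int.floordiv (pvEncR ((s.drop a).take kb) - ((pvCompB (PySem.List.pyGetD s (a : Int) ' ')).toNat : Int)) 128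
      + ((pvCompB (PySem.List.pyGetD s ((a : Int) + (kb : Int)) ' ')).toNat : Int) * 128 ^ (kb - 1)
    = pvEncR ((s.drop (a + 1)).take kb) := by
  have hcast : (a : Int) + (kb : Int) = ((a + kb : Nat) : Int) := by push_cast; ring
  rw [getD_at s a (by omega), hcast, getD_at s (a + kb) h, compB_eq_comp]
  rw [win_decomp_head s kb a hkb h, win_decomp_last s kb a hkb h]
  rw [pvEncR_cons, pvEncR_snoc]
  have hmid : ((s.drop (a + 1)).take (kb - 1)).length = kb - 1 := win_len s (a + 1) (kb - 1) (by omega)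
  rw [hmid]
  have hdiv : PySem.Int.floordiv (((pvComp (s[a]'(by omega))).toNat : Int) + 128 * pvEncR ((s.drop (a + 1)).take (kb - 1))
      - ((pvComp (s[a]'(by omega))).toNat : Int)) 128 = pvEncR ((s.drop (a + 1)).take (kb - 1)) := by
    have he : ((pvComp (s[a]'(by omega))).toNat : Int) + 128 * pvEncR ((s.drop (a + 1)).take (kb - 1))
        - ((pvComp (s[a]'(by omega))).toNat : Int) = pvEncR ((s.drop (a + 1)).take (kb - 1)) * 128 := by ring
    rw [he, PySem.Int.floordiv_eq_ediv_of_pos (by norm_num)]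
    exact Int.mul_ediv_cancel _ (by norm_num)
  rw [hdiv]

-- the main loop, k ≥ 1: B's fold with correct rolling codes computes A's fold
lemma loop_eq (s : List Char) (hs : pvSmall s) (kb : Nat) (hkb : 1 ≤ kb) (top : Int)
    (htop : top = 128 ^ (kb - 1)) :
    ∀ (cnt : Nat), ∀ (a : Nat), a + cnt + kb = s.length + 1 → ∀ (acc : PySem.Dict String Int),
    (List.foldl (pvBstep s (s.length : Int) (kb : Int) top)
      (pvEnc ((s.drop a).take kb), pvEncR ((s.drop a).take kb), acc)
      (PySem.List.pyRange (a : Int) ((a : Int) + (cnt : Int)) 1)).2.2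
    = List.foldl (pvAstep s (kb : Int)) acc (PySem.List.pyRange (a : Int) ((a : Int) + (cnt : Int)) 1) := by
  intro cnt
  induction cnt with
  | zero =>
    intro a _ acc
    rw [PySem.List.pyRange_one_eq_nil (by omega)]
    simp
  | succ cnt ih =>
    intro a hcnt acc
    have ha : a + kb ≤ s.length := by omega
    rw [PySem.List.pyRange_one_cons (by push_cast; omega)]
    rw [List.foldl_cons, List.foldl_cons]
    have hstep : pvBstep s (s.length : Int) (kb : Int) top
        (pvEnc ((s.drop a).take kb), pvEncR ((s.drop a).take kb), acc) (a : Int)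
        = (if (a : Int) + (kb : Int) < (s.length : Int) then
            (pvEnc ((s.drop (a + 1)).take kb), pvEncR ((s.drop (a + 1)).take kb),
              acc.insert (canonical (String.ofList (PySem.List.slice s (some (a : Int)) (some ((a : Int) + (kb : Int))))))
                (acc.getD (canonical (String.ofList (PySem.List.slice s (some (a : Int)) (some ((a : Int) + (kb : Int)))))) 0 + 1))
          else
            (pvEnc ((s.drop a).take kb), pvEncR ((s.drop a).take kb),
              acc.insert (canonical (String.ofList (PySem.List.slice s (some (a : Int)) (some ((a : Int) + (kb : Int))))))
                (acc.getD (canonical (String.ofList (PySem.List.slice s (some (a : Int)) (some ((a : Int) + (kb : Int)))))) 0 + 1))) := by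
      unfold pvBstep
      simp only [step_key s hs kb a ha]
      by_cases hbr : (a : Int) + (kb : Int) < (s.length : Int)
      · have hlt : a + kb < s.length := by exact_mod_cast (by push_cast at hbr ⊢; omega : ((a + kb : Nat) : Int) < (s.length : Int))
        rw [if_pos hbr, if_pos hbr]
        rw [htop]
        rw [roll_fwd s kb a hkb hlt, roll_rc s kb a hkb hlt]
      · rw [if_neg hbr, if_neg hbr]
    rw [hstep]
    have hA : pvAstep s (kb : Int) acc (a : Int)
        = acc.insert (canonical (String.ofList (PySem.List.slice s (some (a : Int)) (some ((a : Int) + (kb : Int))))))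
            (acc.getD (canonical (String.ofList (PySem.List.slice s (some (a : Int)) (some ((a : Int) + (kb : Int)))))) 0 + 1) := by
      unfold pvAstep
      exact dict_step acc _
    rw [hA]
    set acc' := acc.insert (canonical (String.ofList (PySem.List.slice s (some (a : Int)) (some ((a : Int) + (kb : Int))))))
        (acc.getD (canonical (String.ofList (PySem.List.slice s (some (a : Int)) (some ((a : Int) + (kb : Int)))))) 0 + 1) with hacc'
    cases cnt with
    | zero =>
      have hbr : ¬ ((a : Int) + (kb : Int) < (s.length : Int)) := by push_cast; omega
      rw [if_neg hbr]
      have hnil : PySem.List.pyRange ((a : Int) + 1) ((a : Int) + ((0 + 1 : Nat) : Int)) 1 = [] := by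
        apply PySem.List.pyRange_one_eq_nil
        omega
      rw [hnil]
      simp
    | succ cnt' =>
      have hbr : (a : Int) + (kb : Int) < (s.length : Int) := by omega
      rw [if_pos hbr]
      have hrng : PySem.List.pyRange ((a : Int) + 1) ((a : Int) + ((cnt' + 1 + 1 : Nat) : Int)) 1
          = PySem.List.pyRange (((a + 1 : Nat)) : Int) (((a + 1 : Nat) : Int) + ((cnt' + 1 : Nat) : Int)) 1 := by
        congr 1 <;> push_cast <;> ring
      rw [hrng]
      exact ih (a + 1) (by omega) acc'

-- the main loop, k = 0: every window is the empty k-mer, whatever the codes are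
lemma loop_eq0 (s : List Char) (top : Int) :
    ∀ (l : List Int) (fwd rc : Int) (acc : PySem.Dict String Int),
    (List.foldl (pvBstep s (s.length : Int) 0 top) (fwd, rc, acc) l).2.2
    = List.foldl (pvAstep s 0) acc l := by
  intro l
  induction l with
  | nil => intro fwd rc acc; rfl
  | cons i l ih =>
    intro fwd rc acc
    rw [List.foldl_cons, List.foldl_cons]
    have hkey : (if fwd ≤ rc then String.ofList (PySem.List.slice s (some i) (some (i + 0)))
        else String.ofList (List.map pvCompB (PySem.List.slice s (some i) (some (i + 0))).reverse)) = String.ofList [] := by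
      rw [add_zero, slice_self]
      simp
    have hAkey : canonical (String.ofList (PySem.List.slice s (some i) (some (i + 0)))) = String.ofList [] := by
      rw [add_zero, slice_self, canonical_nil]
    have hstep : pvBstep s (s.length : Int) 0 top (fwd, rc, acc) i
        = (if i + 0 < (s.length : Int) then
            ((fwd - ((PySem.List.pyGetD s i ' ').toNat : Int) * top) * 128 + ((PySem.List.pyGetD s (i + 0) ' ').toNat : Int),
             PySem.Int.floordiv (rc - ((pvCompB (PySem.List.pyGetD s i ' ')).toNat : Int)) 128
               + ((pvCompB (PySem.List.pyGetD s (i + 0) ' ')).toNat : Int) * top,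
             acc.insert (String.ofList []) (acc.getD (String.ofList []) 0 + 1))
          else (fwd, rc, acc.insert (String.ofList []) (acc.getD (String.ofList []) 0 + 1))) := by
      unfold pvBstep
      rw [hkey]
    have hA : pvAstep s 0 acc i = acc.insert (String.ofList []) (acc.getD (String.ofList []) 0 + 1) := by
      unfold pvAstep
      rw [hAkey]
      exact dict_step acc _
    rw [hstep, hA]
    by_cases hbr : i + 0 < (s.length : Int)
    · rw [if_pos hbr]; exact ih _ _ _
    · rw [if_neg hbr]; exact ih _ _ _

lemma dom_small (seq : String) (kmer_freq_dict : List (String × Int)) (k_size : Int)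
    (h : Dom_kmer_generation seq kmer_freq_dict k_size) : pvSmall seq.toList := by
  unfold Dom_kmer_generation at h
  simp only [Bool.and_eq_true, pvDomStr, List.all_eq_true, pvDomChar] at h
  intro c hc
  have := h.1.1 c hc
  simp only [Bool.or_eq_true, Bool.and_eq_true, decide_eq_true_eq, beq_iff_eq] at this
  omega

lemma main_eq (seq : String) (d : List (String × Int)) (kb : Nat) (hs : pvSmall seq.toList) :
    kmer_generation seq d (kb : Int) = kmer_generation_alt seq d (kb : Int) := by
  have hA : kmer_generation seq d (kb : Int)
      = (List.foldl (pvAstep seq.toList (kb : Int)) (PySem.Dict.ofList d)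
          (PySem.List.pyRange 0 ((seq.toList.length : Int) - (kb : Int) + 1) 1)).items := rfl
  have hB : kmer_generation_alt seq d (kb : Int)
      = (List.foldl
          (pvBstep seq.toList (seq.toList.length : Int) (kb : Int) (PySem.Int.floordiv (pvInit seq.toList (kb : Int)).2.2 128))
          ((pvInit seq.toList (kb : Int)).1, (pvInit seq.toList (kb : Int)).2.1, PySem.Dict.ofList d)
          (PySem.List.pyRange 0 ((seq.toList.length : Int) - (kb : Int) + 1) 1)).2.2.items := rfl
  rw [hA, hB]
  set s := seq.toList with hsdef
  have hinit : pvInit s (kb : Int) = (pvEnc (s.take kb), pvEncR (s.take kb), 128 ^ (s.take kb).length) := by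
    unfold pvInit
    rw [PySem.List.slice_to_natCast]
    rw [init_fold (s.take kb) 0 0 1]
    simp [pvEnc]
  rw [hinit]
  cases Nat.eq_zero_or_pos kb with
  | inl h0 =>
    subst h0
    simp only [Nat.cast_zero]
    exact congrArg PySem.Dict.items (loop_eq0 s _ _ _ _ _).symm
  | inr hpos =>
    by_cases hbig : (s.length : Int) - (kb : Int) + 1 ≤ 0
    · rw [PySem.List.pyRange_one_eq_nil hbig]
      rfl
    · have hkle : kb ≤ s.length := by omega
      have htake : (s.take kb).length = kb := by simp [List.length_take]; omega
      have htop : PySem.Int.floordiv ((128 : Int) ^ (s.take kb).length) 128 = 128 ^ (kb - 1) := by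
        rw [htake]
        obtain ⟨kb', rfl⟩ : ∃ kb', kb = kb' + 1 := ⟨kb - 1, by omega⟩
        rw [pow_succ, PySem.Int.floordiv_eq_ediv_of_pos (by norm_num)]
        simp [Int.mul_ediv_cancel _ (by norm_num : (128 : Int) ≠ 0)]
      rw [htop]
      have hrng : PySem.List.pyRange 0 ((s.length : Int) - (kb : Int) + 1) 1
          = PySem.List.pyRange (((0 : Nat)) : Int) (((0 : Nat) : Int) + ((s.length + 1 - kb : Nat) : Int)) 1 := by
        congr 1 <;> push_cast <;> omega
      rw [hrng]
      have hwin : s.take kb = (s.drop 0).take kb := by rw [List.drop_zero]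
      rw [hwin]
      exact congrArg PySem.Dict.items (loop_eq s hs kb hpos _ rfl (s.length + 1 - kb) 0 (by omega) (PySem.Dict.ofList d)).symm

theorem kmer_generation_spec : Claim_equal_kmer_generation := by
  intro seq d k hdom hpre
  obtain ⟨kb, rfl⟩ := Int.eq_ofNat_of_zero_le hpre
  exact main_eq seq d kb (dom_small seq d _ hdom)
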